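-- pv_equiv track=rewrite | github.com/YodZ0/epi-registry | backend/src/apps/asm/service.py | _group_by_tiers
-- ===== SOURCE A (Python) =====
-- from typing import List, Dict
--
-- def _group_by_tiers(score_map: Dict[str, int]) -> Dict[str, List[str]]:
--     """
--     Group modified score map by tiers.
--
--     Input: {
--       "VPA": 2,
--       "LTG": 1, "LEV": 1,
--       "TPM": 3, "ZNS": 3, "CLB": 3, "CLN": 3,
--     }
--     Output: {
--       "tier_1": ["LTG", "LEV"],
--       "tier_2": ["VPA"],
--       "tier_3": ["TPM", "ZNS", "CLB", "CLN"],
--     }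
--     """
--     tiers: Dict[str, List[str]] = {
--         "tier_1": [],
--         "tier_2": [],
--         "tier_3": [],
--         "tier_4": [],
--     }
--
--     for drug, score in score_map.items():
--         if score <= 1:
--             tiers["tier_1"].append(drug)
--         elif score == 2:
--             tiers["tier_2"].append(drug)
--         elif score == 3:
--             tiers["tier_3"].append(drug)
--         else:  # 4 и выше
--             tiers["tier_4"].append(drug)
--
--     # Exclude empty tiers
--     return {k: v for k, v in tiers.items() if v}
-- ===== SOURCE B (Python) =====
-- from typing import List, Dict
--
-- def _group_by_tiers(score_map: Dict[str, int]) -> Dict[str, List[str]]: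
--     def tier(score: int) -> int:
--         return 1 if score <= 1 else (score if score <= 3 else 4)
--
--     # Stable sort brings the drugs of each tier together, in input order;
--     # one grouping pass then collects consecutive entries under their tier key.
--     ordered = sorted(score_map.items(), key=lambda kv: tier(kv[1]))
--     result: Dict[str, List[str]] = {}
--     for drug, score in ordered:
--         key = "tier_%d" % tier(score)
--         if key in result:
--             result[key] = result[key] + [drug]
--         else:
--             result[key] = [drug]
--     return result
-- ===== Notes on version B (the rewrite author's own statement) =====
-- stated objective: alternative
-- what changed: Replaces A's one-pass routing into four pre-allocated tier buckets (plus an empty-tier filter) with a sort-then-group algorithm: a stable sort by tier key brings each tier's drugs together in input order, and a single grouping pass builds the result dict directly, so empty tiers never arise and no filtering step is needed.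
import Mathlib
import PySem

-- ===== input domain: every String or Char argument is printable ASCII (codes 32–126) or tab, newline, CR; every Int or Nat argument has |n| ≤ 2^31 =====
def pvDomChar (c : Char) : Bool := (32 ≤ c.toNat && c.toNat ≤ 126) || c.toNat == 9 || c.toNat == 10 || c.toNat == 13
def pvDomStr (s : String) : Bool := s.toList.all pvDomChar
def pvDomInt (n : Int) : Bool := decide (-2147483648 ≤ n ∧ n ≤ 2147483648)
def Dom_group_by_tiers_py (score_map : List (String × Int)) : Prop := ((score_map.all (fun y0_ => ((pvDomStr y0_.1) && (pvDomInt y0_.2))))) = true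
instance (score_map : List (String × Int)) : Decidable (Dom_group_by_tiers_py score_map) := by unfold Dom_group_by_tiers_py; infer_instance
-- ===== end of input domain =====

-- B replaces A's single routing pass into four pre-made buckets with a sort-then-group
-- algorithm: a stable sort by tier key, then one grouping pass building the result dict
-- (objective: alternative algorithm, same observable result).


-- ===== PORT A =====
-- A keeps a dict with the four fixed keys "tier_1".."tier_4" and appends each drug to
-- the list behind the matching key; ported as a fold over the same four lists, then the
-- empty-tier filter.
def group_by_tiers_py (score_map : List (String × Int)) : List (String × List String) :=
  let tiers := score_map.foldl
    (fun (t : List String × List String × List String × List String) p =>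
      if p.2 ≤ 1 then (t.1 ++ [p.1], t.2.1, t.2.2.1, t.2.2.2)
      else if p.2 = 2 then (t.1, t.2.1 ++ [p.1], t.2.2.1, t.2.2.2)
      else if p.2 = 3 then (t.1, t.2.1, t.2.2.1 ++ [p.1], t.2.2.2)
      else (t.1, t.2.1, t.2.2.1, t.2.2.2 ++ [p.1]))
    ([], [], [], [])
  ([("tier_1", tiers.1), ("tier_2", tiers.2.1),
    ("tier_3", tiers.2.2.1), ("tier_4", tiers.2.2.2)] : List (String × List String)).filter
    (fun kv => !kv.2.isEmpty)

-- ===== PORT B =====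
-- B: tier(score) as in Source B
def pvTierB (s : Int) : Int := if s ≤ 1 then 1 else if s ≤ 3 then s else 4
-- "tier_%d" % tier(score)
def pvTname (s : Int) : String := "tier_" ++ PySem.Int.toStr (pvTierB s)
-- the body of Source B's grouping loop
def pvStepB (d : PySem.Dict String (List String)) (p : String × Int) :
    PySem.Dict String (List String) :=
  let key := pvTname p.2
  if d.contains key then d.insert key (d.getD key [] ++ [p.1]) else d.insert key [p.1]
-- Source B: stable sort by tier, then the grouping pass
def group_by_tiers_py_alt (score_map : List (String × Int)) : List (String × List String) :=
  let ordered := PySem.List.sorted score_map (fun kv => pvTierB kv.2)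
  (ordered.foldl pvStepB PySem.Dict.empty).items

-- ===== PRECONDITION & SPEC =====
def Spec_group_by_tiers_py (score_map : List (String × Int)) (out : List (String × List String)) : Prop := out = group_by_tiers_py_alt score_map
instance (score_map : List (String × Int)) (out : List (String × List String)) : Decidable (Spec_group_by_tiers_py score_map out) := by unfold Spec_group_by_tiers_py; infer_instance

-- ===== CLAIM =====
def Claim_equal_group_by_tiers_py : Prop := ∀ (score_map : List (String × Int)), Dom_group_by_tiers_py score_map → Spec_group_by_tiers_py score_map (group_by_tiers_py score_map)

-- ===== LEMMAS AND PROOFS =====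

-- tier values are exactly 1,2,3,4
theorem pvTierB_cases (s : Int) :
    pvTierB s = 1 ∨ pvTierB s = 2 ∨ pvTierB s = 3 ∨ pvTierB s = 4 := by
  unfold pvTierB; split_ifs <;> omega

-- A's routing loop accumulates, onto each of the four lists, exactly the drugs whose
-- score satisfies that tier's predicate, in input order.
theorem group_by_tiers_loop (l : List (String × Int))
    (a b c d : List String) :
    l.foldl
      (fun (t : List String × List String × List String × List String) p =>
        if p.2 ≤ 1 then (t.1 ++ [p.1], t.2.1, t.2.2.1, t.2.2.2)
        else if p.2 = 2 then (t.1, t.2.1 ++ [p.1], t.2.2.1, t.2.2.2)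
        else if p.2 = 3 then (t.1, t.2.1, t.2.2.1 ++ [p.1], t.2.2.2)
        else (t.1, t.2.1, t.2.2.1, t.2.2.2 ++ [p.1]))
      (a, b, c, d)
    = (a ++ ((l.filter (fun p => pvTierB p.2 = 1)).map Prod.fst),
       b ++ ((l.filter (fun p => pvTierB p.2 = 2)).map Prod.fst),
       c ++ ((l.filter (fun p => pvTierB p.2 = 3)).map Prod.fst),
       d ++ ((l.filter (fun p => pvTierB p.2 = 4)).map Prod.fst)) := by
  induction l generalizing a b c d with
  | nil => simp
  | cons hd tl ih =>
    rcases pvTierB_cases hd.2 with h | h | h | h <;>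
      [ (have hs : hd.2 ≤ 1 := by unfold pvTierB at h; split_ifs at h <;> omega);
        (have hs : hd.2 = 2 := by unfold pvTierB at h; split_ifs at h <;> omega);
        (have hs : hd.2 = 3 := by unfold pvTierB at h; split_ifs at h <;> omega);
        (have hs : 4 ≤ hd.2 := by unfold pvTierB at h; split_ifs at h <;> omega) ] <;>
      (simp [List.foldl_cons, h, ih]; split_ifs <;> simp_all <;> omega)

-- inserting x into l1 ++ l2, where x goes after everything in l1 and before everything in l2
theorem insertBy_mid {α : Type} (before : α → α → Bool) (x : α) (l1 l2 : List α)
    (h1 : ∀ y ∈ l1, before x y = false) (h2 : ∀ y ∈ l2, before x y = true) :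
    PySem.List.insertBy before x (l1 ++ l2) = l1 ++ x :: l2 := by
  induction l1 with
  | nil =>
    cases l2 with
    | nil => simp [PySem.List.insertBy]
    | cons r t => simp [PySem.List.insertBy, h2 r (by simp)]
  | cons y t ih =>
    simp only [List.cons_append, PySem.List.insertBy, h1 y (by simp)]
    simp only [Bool.false_eq_true, if_false, List.cons.injEq, true_and]
    exact ih (fun z hz => h1 z (by simp [hz]))

-- the insertion-sort fold keeps the four tier buckets in order, each in input order
theorem foldl_insertBy_buckets (l f1 f2 f3 f4 : List (String × Int))
    (g1 : ∀ x ∈ f1, pvTierB x.2 = 1) (g2 : ∀ x ∈ f2, pvTierB x.2 = 2)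
    (g3 : ∀ x ∈ f3, pvTierB x.2 = 3) (g4 : ∀ x ∈ f4, pvTierB x.2 = 4) :
    l.foldl (fun acc x => PySem.List.insertBy
        (fun a b => decide (pvTierB a.2 < pvTierB b.2)) x acc)
      (f1 ++ f2 ++ f3 ++ f4)
    = (f1 ++ l.filter (fun p => pvTierB p.2 = 1))
      ++ (f2 ++ l.filter (fun p => pvTierB p.2 = 2))
      ++ (f3 ++ l.filter (fun p => pvTierB p.2 = 3))
      ++ (f4 ++ l.filter (fun p => pvTierB p.2 = 4)) := by
  induction l generalizing f1 f2 f3 f4 with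
  | nil => simp
  | cons x tl ih =>
    rcases pvTierB_cases x.2 with h | h | h | h
    · rw [List.foldl_cons,
        show f1 ++ f2 ++ f3 ++ f4 = f1 ++ (f2 ++ f3 ++ f4) by simp,
        insertBy_mid _ x f1 (f2 ++ f3 ++ f4)
          (fun y hy => by simp [g1 y hy, h])
          (fun y hy => by
            rcases List.mem_append.1 hy with hy' | hy'
            · rcases List.mem_append.1 hy' with hy'' | hy''
              · simp [g2 y hy'', h]
              · simp [g3 y hy'', h]
            · simp [g4 y hy', h]),
        show f1 ++ x :: (f2 ++ f3 ++ f4) = (f1 ++ [x]) ++ f2 ++ f3 ++ f4 by simp]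
      rw [ih (f1 ++ [x]) f2 f3 f4
        (fun y hy => by rcases List.mem_append.1 hy with hy' | hy'
                        · exact g1 y hy'
                        · simp at hy'; subst hy'; exact h) g2 g3 g4]
      simp [h]
    · rw [List.foldl_cons,
        show f1 ++ f2 ++ f3 ++ f4 = (f1 ++ f2) ++ (f3 ++ f4) by simp,
        insertBy_mid _ x (f1 ++ f2) (f3 ++ f4)
          (fun y hy => by
            rcases List.mem_append.1 hy with hy' | hy'
            · simp [g1 y hy', h]
            · simp [g2 y hy', h])
          (fun y hy => by
            rcases List.mem_append.1 hy with hy' | hy'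
            · simp [g3 y hy', h]
            · simp [g4 y hy', h]),
        show (f1 ++ f2) ++ x :: (f3 ++ f4) = f1 ++ (f2 ++ [x]) ++ f3 ++ f4 by simp]
      rw [ih f1 (f2 ++ [x]) f3 f4 g1
        (fun y hy => by rcases List.mem_append.1 hy with hy' | hy'
                        · exact g2 y hy'
                        · simp at hy'; subst hy'; exact h) g3 g4]
      simp [h]
    · rw [List.foldl_cons,
        show f1 ++ f2 ++ f3 ++ f4 = (f1 ++ f2 ++ f3) ++ f4 by simp,
        insertBy_mid _ x (f1 ++ f2 ++ f3) f4
          (fun y hy => by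
            rcases List.mem_append.1 hy with hy' | hy'
            · rcases List.mem_append.1 hy' with hy'' | hy''
              · simp [g1 y hy'', h]
              · simp [g2 y hy'', h]
            · simp [g3 y hy', h])
          (fun y hy => by simp [g4 y hy, h]),
        show (f1 ++ f2 ++ f3) ++ x :: f4 = f1 ++ f2 ++ (f3 ++ [x]) ++ f4 by simp]
      rw [ih f1 f2 (f3 ++ [x]) f4 g1 g2
        (fun y hy => by rcases List.mem_append.1 hy with hy' | hy'
                        · exact g3 y hy'
                        · simp at hy'; subst hy'; exact h) g4]
      simp [h]
    · rw [List.foldl_cons,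
        PySem.List.insertBy_of_forall_not_before _ x (f1 ++ f2 ++ f3 ++ f4)
          (fun y hy => by
            rcases List.mem_append.1 hy with hy' | hy'
            · rcases List.mem_append.1 hy' with hy'' | hy''
              · rcases List.mem_append.1 hy'' with hy''' | hy'''
                · simp [g1 y hy''', h]
                · simp [g2 y hy''', h]
              · simp [g3 y hy'', h]
            · simp [g4 y hy', h]),
        show (f1 ++ f2 ++ f3 ++ f4) ++ [x] = f1 ++ f2 ++ f3 ++ (f4 ++ [x]) by simp]
      rw [ih f1 f2 f3 (f4 ++ [x]) g1 g2 g3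
        (fun y hy => by rcases List.mem_append.1 hy with hy' | hy'
                        · exact g4 y hy'
                        · simp at hy'; subst hy'; exact h)]
      simp [h]
  
-- B's stable sort by tier = the four tier filters concatenated
theorem sorted_by_tier (l : List (String × Int)) :
    PySem.List.sorted l (fun kv => pvTierB kv.2)
    = l.filter (fun p => pvTierB p.2 = 1) ++ l.filter (fun p => pvTierB p.2 = 2)
      ++ l.filter (fun p => pvTierB p.2 = 3) ++ l.filter (fun p => pvTierB p.2 = 4) := by
  rw [PySem.List.sorted_eq_foldl_insertBy]
  simpa using foldl_insertBy_buckets l [] [] [] []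
    (by simp) (by simp) (by simp) (by simp)

-- lookup in a dict whose last entry is (k, v), k absent earlier
theorem get?_mk_append_last (pre : List (String × List String)) (k : String) (v : List String)
    (h : ∀ q ∈ pre, q.1 ≠ k) :
    (PySem.Dict.mk (pre ++ [(k, v)]) : PySem.Dict String (List String)).get? k = some v := by
  induction pre with
  | nil => simp [PySem.Dict.get?_mk_cons]
  | cons q t ih =>
    rw [List.cons_append, PySem.Dict.get?_mk_cons, if_neg (by simp [h q (by simp)])]
    exact ih (fun z hz => h z (by simp [hz]))

-- running Source B's grouping loop over entries that all map to the dict's last key k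
-- appends their drugs to k's list in place
theorem stepB_run (k : String) (l : List (String × Int)) (pre : List (String × List String))
    (v : List String) (hl : ∀ p ∈ l, pvTname p.2 = k) (hpre : ∀ q ∈ pre, q.1 ≠ k) :
    l.foldl pvStepB (PySem.Dict.mk (pre ++ [(k, v)]))
      = PySem.Dict.mk (pre ++ [(k, v ++ l.map Prod.fst)]) := by
  induction l generalizing v with
  | nil => simp
  | cons p tl ih =>
    have hk : pvTname p.2 = k := hl p (by simp)
    have hget := get?_mk_append_last pre k v hpre
    have hcont : (PySem.Dict.mk (pre ++ [(k, v)]) : PySem.Dict String (List String)).contains k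
        = true := by
      rw [PySem.Dict.contains_eq_isSome_get?, hget]; rfl
    have hins : (PySem.Dict.mk (pre ++ [(k, v)]) : PySem.Dict String (List String)).insert k
        (v ++ [p.1]) = PySem.Dict.mk (pre ++ [(k, v ++ [p.1])]) := by
      apply PySem.Dict.ext
      rw [PySem.Dict.items_insert_of_contains _ _ hcont]
      show List.map _ (pre ++ [(k, v)]) = _
      rw [List.map_append]
      congr 1
      · exact List.map_congr_left (fun q hq => by simp [hpre q hq]) |>.trans (List.map_id _)
      · simp
    rw [List.foldl_cons]
    rw [show pvStepB (PySem.Dict.mk (pre ++ [(k, v)])) p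
          = PySem.Dict.mk (pre ++ [(k, v ++ [p.1])]) by
        unfold pvStepB
        rw [hk, if_pos hcont, PySem.Dict.getD_eq_get?_getD, hget]
        exact hins]
    rw [ih (v ++ [p.1]) (fun z hz => hl z (by simp [hz]))]
    simp

-- one whole bucket (all entries of tier key k, k fresh in d)
theorem stepB_bucket (k : String) (l : List (String × Int))
    (d : PySem.Dict String (List String))
    (hl : ∀ p ∈ l, pvTname p.2 = k) (hd : ∀ q ∈ d.items, q.1 ≠ k) :
    l.foldl pvStepB d
      = if l = [] then d else PySem.Dict.mk (d.items ++ [(k, l.map Prod.fst)]) := by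
  cases l with
  | nil => simp
  | cons p tl =>
    rw [if_neg (by simp)]
    have hk : pvTname p.2 = k := hl p (by simp)
    have hget : d.get? k = none := by
      rw [PySem.Dict.get?_eq_none_iff_not_mem_keys]
      simp only [PySem.Dict.keys, List.mem_map]
      rintro ⟨q, hq, hq1⟩
      exact hd q hq hq1
    have hcont : d.contains k = false := by
      rw [PySem.Dict.contains_eq_isSome_get?, hget]; rfl
    rw [List.foldl_cons,
      show pvStepB d p = PySem.Dict.mk (d.items ++ [(k, [p.1])]) by
        unfold pvStepB
        rw [hk, if_neg (by simp [hcont])]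
        apply PySem.Dict.ext
        rw [PySem.Dict.items_insert_of_not_contains _ _ hcont],
      stepB_run k tl d.items [p.1] (fun z hz => hl z (by simp [hz])) hd]
    simp

-- the whole grouping pass over buckets with distinct fresh keys
theorem stepB_chain (bs : List (String × List (String × Int)))
    (d : PySem.Dict String (List String))
    (hb : ∀ b ∈ bs, ∀ p ∈ b.2, pvTname p.2 = b.1)
    (hd : ∀ b ∈ bs, ∀ q ∈ d.items, q.1 ≠ b.1)
    (hp : List.Pairwise (fun a b => a.1 ≠ b.1) bs) :
    (bs.flatMap (fun b => b.2)).foldl pvStepB d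
      = PySem.Dict.mk (d.items
          ++ bs.filterMap (fun b => if b.2 = [] then none
                                    else some (b.1, b.2.map Prod.fst))) := by
  induction bs generalizing d with
  | nil => cases d; simp
  | cons b bs ih =>
    rw [List.flatMap_cons, List.foldl_append,
      stepB_bucket b.1 b.2 d (hb b (by simp)) (hd b (by simp))]
    by_cases he : b.2 = []
    · rw [if_pos he,
        ih d (fun b' h' => hb b' (by simp [h'])) (fun b' h' => hd b' (by simp [h']))
          (List.Pairwise.sublist (by simp) hp)]
      simp [he]
    · rw [if_neg he,
        ih (PySem.Dict.mk (d.items ++ [(b.1, b.2.map Prod.fst)]))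
          (fun b' h' => hb b' (by simp [h']))
          (fun b' h' q hq => by
            rcases List.mem_append.1 hq with hq' | hq'
            · exact hd b' (by simp [h']) q hq'
            · simp only [List.mem_singleton] at hq'
              subst hq'
              exact (List.pairwise_cons.1 hp).1 b' h')
          (List.Pairwise.sublist (by simp) hp)]
      simp [he]

-- ===== VERDICT =====
theorem group_by_tiers_py_spec : Claim_equal_group_by_tiers_py := by
  intro l _
  show group_by_tiers_py l = group_by_tiers_py_alt l
  rw [show group_by_tiers_py_alt l
        = (List.foldl pvStepB PySem.Dict.empty
            (PySem.List.sorted l (fun kv => pvTierB kv.2))).items from rfl,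
    show group_by_tiers_py l
        = (let tiers := l.foldl
            (fun (t : List String × List String × List String × List String) p =>
              if p.2 ≤ 1 then (t.1 ++ [p.1], t.2.1, t.2.2.1, t.2.2.2)
              else if p.2 = 2 then (t.1, t.2.1 ++ [p.1], t.2.2.1, t.2.2.2)
              else if p.2 = 3 then (t.1, t.2.1, t.2.2.1 ++ [p.1], t.2.2.2)
              else (t.1, t.2.1, t.2.2.1, t.2.2.2 ++ [p.1]))
            ([], [], [], [])
          ([("tier_1", tiers.1), ("tier_2", tiers.2.1),
            ("tier_3", tiers.2.2.1), ("tier_4", tiers.2.2.2)] : List (String × List String)).filter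
            (fun kv => !kv.2.isEmpty)) from rfl]
  simp only []
  rw [sorted_by_tier,
    show l.filter (fun p => pvTierB p.2 = 1) ++ l.filter (fun p => pvTierB p.2 = 2)
        ++ l.filter (fun p => pvTierB p.2 = 3) ++ l.filter (fun p => pvTierB p.2 = 4)
      = List.flatMap (fun b => b.2)
          [("tier_1", l.filter (fun p => pvTierB p.2 = 1)),
           ("tier_2", l.filter (fun p => pvTierB p.2 = 2)),
           ("tier_3", l.filter (fun p => pvTierB p.2 = 3)),
           ("tier_4", l.filter (fun p => pvTierB p.2 = 4))] by simp [List.flatMap_cons]]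
  rw [stepB_chain _ PySem.Dict.empty
    (by
      intro b hb p hp
      simp only [List.mem_cons, List.not_mem_nil, or_false] at hb
      rcases hb with h | h | h | h <;> subst h <;>
        simp only [List.mem_filter, decide_eq_true_eq] at hp <;>
        · unfold pvTname; rw [hp.2]; rfl)
    (by intro b _ q hq; simp [PySem.Dict.empty] at hq)
    (by simp)]
  rw [group_by_tiers_loop]
  by_cases h1 : l.filter (fun p => pvTierB p.2 = 1) = [] <;>
    by_cases h2 : l.filter (fun p => pvTierB p.2 = 2) = [] <;>
      by_cases h3 : l.filter (fun p => pvTierB p.2 = 3) = [] <;>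
        by_cases h4 : l.filter (fun p => pvTierB p.2 = 4) = [] <;>
          simp [PySem.Dict.empty, h1, h2, h3, h4]
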